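-- pv_equiv track=rewrite | github.com/nicholasbl/YATDTCPP | install_deps.py | flags_apply
-- ===== SOURCE A (Python) =====
-- def flags_apply(sys_flags, opt_flags):
--     must_have = []
--     must_not_have = []
--
--     for f in opt_flags:
--         if f.startswith('!'):
--             f = f[1:]
--             must_not_have.append(f)
--         else:
--             must_have.append(f)
--
--     must_have = set(must_have)
--     must_not_have = set(must_not_have)
--
--     return must_not_have.isdisjoint(sys_flags) and \
--         must_have.issubset(sys_flags)
-- ===== SOURCE B (Python) =====
-- def flags_apply(sys_flags, opt_flags):
--     # Sort-and-merge: sort requirements by name, sort the distinct system flags,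
--     # then decide every requirement in one forward merge scan (no repeated membership tests).
--     reqs = sorted(((f[1:], False) if f.startswith('!') else (f, True) for f in opt_flags),
--                   key=lambda p: p[0])
--     avail = sorted(set(sys_flags))
--     i = 0
--     for name, needed in reqs:
--         while i < len(avail) and avail[i] < name:
--             i += 1
--         present = i < len(avail) and avail[i] == name
--         if present != needed:
--             return False
--     return True
-- ===== Notes on version B (the rewrite author's own statement) =====
-- stated objective: alternative
-- what changed: Replaces the two accumulated sets and the batch isdisjoint/issubset membership tests by a sort-and-merge algorithm: requirements sorted by flag name and the distinct system flags sorted, then one forward two-pointer merge scan decides presence/absence of every requirement.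
import Mathlib
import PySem

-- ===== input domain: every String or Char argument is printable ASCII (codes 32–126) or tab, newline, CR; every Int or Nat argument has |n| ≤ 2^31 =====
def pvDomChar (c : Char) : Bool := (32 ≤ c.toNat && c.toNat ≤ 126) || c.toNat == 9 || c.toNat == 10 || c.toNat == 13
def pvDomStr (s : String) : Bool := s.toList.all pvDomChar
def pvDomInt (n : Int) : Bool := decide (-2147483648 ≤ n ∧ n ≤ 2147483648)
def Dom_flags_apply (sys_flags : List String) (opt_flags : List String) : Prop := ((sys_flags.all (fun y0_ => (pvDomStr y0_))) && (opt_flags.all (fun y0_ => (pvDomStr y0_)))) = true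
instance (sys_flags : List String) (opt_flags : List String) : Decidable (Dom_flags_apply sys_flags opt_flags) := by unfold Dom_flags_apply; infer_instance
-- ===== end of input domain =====

-- B replaces the accumulated sets and the batch isdisjoint/issubset tests by a
-- sort-and-merge algorithm: requirements sorted by name, distinct system flags
-- sorted, one forward merge scan (objective: alternative).

-- ===== PORT A =====
def flags_apply (sys_flags : List String) (opt_flags : List String) : Bool :=
  let acc := opt_flags.foldl
    (fun (acc : List String × List String) f =>
      if PySem.Str.startswith f "!" then
        (acc.1, acc.2 ++ [PySem.Str.slice f (some 1) none])
      else
        (acc.1 ++ [f], acc.2)) ([], [])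
  let must_have : PySem.Set String := PySem.Set.ofList acc.1
  let must_not_have : PySem.Set String := PySem.Set.ofList acc.2
  PySem.Set.isdisjoint must_not_have sys_flags && PySem.Set.issubset must_have sys_flags

-- ===== PORT B =====
-- the merge scan: Python's index i advancing over avail is ported as dropWhile on
-- the remaining suffix of the sorted list (exact: the while loop skips the prefix < name)
def flagsMergeScan : List (String × Bool) → List String → Bool
  | [], _ => true
  | (name, needed) :: rest, avail =>
    let avail' := avail.dropWhile (fun s => decide (s < name))
    let present : Bool := match avail' with | [] => false | x :: _ => x == name
    if present == needed then flagsMergeScan rest avail' else false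

def flags_apply_alt (sys_flags : List String) (opt_flags : List String) : Bool :=
  let reqs := PySem.List.sorted
    (opt_flags.map (fun f =>
      if PySem.Str.startswith f "!" then (PySem.Str.slice f (some 1) none, false)
      else (f, true)))
    (fun p => p.1)
  let avail := PySem.List.sorted (PySem.Set.ofList sys_flags) (fun x => x)
  flagsMergeScan reqs avail

-- ===== PRECONDITION & SPEC =====
def Spec_flags_apply (sys_flags : List String) (opt_flags : List String) (out : Bool) : Prop := out = flags_apply_alt sys_flags opt_flags
instance (sys_flags : List String) (opt_flags : List String) (out : Bool) : Decidable (Spec_flags_apply sys_flags opt_flags out) := by unfold Spec_flags_apply; infer_instance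

-- ===== CLAIM (what is proved, stated in full; the proofs are below) =====
def Claim_equal_flags_apply : Prop := ∀ (sys_flags : List String) (opt_flags : List String), Dom_flags_apply sys_flags opt_flags → Spec_flags_apply sys_flags opt_flags (flags_apply sys_flags opt_flags)

-- ===== LEMMAS AND PROOFS =====

-- A's fold collects exactly the non-'!' flags and the stripped '!' flags (in order).
theorem flags_apply_fold_eq (opt_flags a b : List String) :
    opt_flags.foldl
      (fun (acc : List String × List String) f =>
        if PySem.Str.startswith f "!" then
          (acc.1, acc.2 ++ [PySem.Str.slice f (some 1) none])
        else
          (acc.1 ++ [f], acc.2)) (a, b)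
    = (a ++ opt_flags.filter (fun f => !PySem.Str.startswith f "!"),
       b ++ (opt_flags.filter (fun f => PySem.Str.startswith f "!")).map
              (fun f => PySem.Str.slice f (some 1) none)) := by
  induction opt_flags generalizing a b with
  | nil => simp
  | cons f rest ih =>
    rw [List.foldl_cons]
    by_cases h : PySem.Str.startswith f "!" = true
    · rw [if_pos h, ih, List.filter_cons, List.filter_cons, if_neg (by simpa using h), if_pos h]
      simp
    · rw [if_neg h, ih, List.filter_cons, List.filter_cons,
        if_pos (by simp [Bool.not_eq_true] at h ⊢; exact h), if_neg h]
      simp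

-- dropping elements < n does not affect membership of any m ≥ n
theorem mem_dropWhile_lt_iff (l : List String) (n m : String) (h : n ≤ m) :
    m ∈ l.dropWhile (fun s => decide (s < n)) ↔ m ∈ l := by
  constructor
  · exact fun hm => (List.dropWhile_sublist _).mem hm
  · intro hm
    rw [← List.takeWhile_append_dropWhile (p := fun s => decide (s < n)) (l := l),
      List.mem_append] at hm
    rcases hm with hm | hm
    · have := List.mem_takeWhile_imp hm
      simp only [decide_eq_true_eq] at this
      exact absurd this (not_lt.mpr h)
    · exact hm

-- on a strictly sorted list, the head test after dropWhile decides membership of n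
theorem head_dropWhile_eq_mem (l : List String) (n : String) (hl : l.Pairwise (· < ·)) :
    (match l.dropWhile (fun s => decide (s < n)) with
      | [] => false | x :: _ => x == n) = decide (n ∈ l) := by
  have hiff := mem_dropWhile_lt_iff l n n le_rfl
  cases hdw : l.dropWhile (fun s => decide (s < n)) with
  | nil =>
    rw [hdw] at hiff
    simp only [List.not_mem_nil, false_iff] at hiff
    simp [hiff]
  | cons x t =>
    rw [hdw] at hiff
    have hxpred : ¬ (x < n) := by
      have := List.head?_dropWhile_not (p := fun s => decide (s < n)) (l := l)
      rw [hdw] at this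
      simpa using this
    by_cases hx : x = n
    · subst hx
      simp only [beq_self_eq_true]
      have hxl : x ∈ l := by
        have hs := List.dropWhile_sublist (p := fun s => decide (s < x)) (l := l)
        rw [hdw] at hs
        exact hs.mem List.mem_cons_self
      simp [hxl]
    · have hnotmem : n ∉ l := by
        intro hnl
        have : n ∈ x :: t := hiff.mpr hnl
        rcases List.mem_cons.mp this with h' | h'
        · exact hx h'.symm
        · -- n after x in the sorted dropWhile suffix ⇒ x < n, contradiction
          have hsorted : (x :: t).Pairwise (· < ·) := by
            rw [← hdw]; exact hl.sublist (List.dropWhile_sublist _)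
          exact hxpred ((List.pairwise_cons.mp hsorted).1 n h')
      simp [hnotmem, hx]

-- the merge scan decides exactly "each requirement's membership matches its polarity"
theorem flagsMergeScan_iff (reqs : List (String × Bool)) (l : List String)
    (hl : l.Pairwise (· < ·))
    (hr : reqs.Pairwise (fun p q => p.1 ≤ q.1)) :
    flagsMergeScan reqs l = true ↔ ∀ p ∈ reqs, decide (p.1 ∈ l) = p.2 := by
  induction reqs generalizing l with
  | nil => simp [flagsMergeScan]
  | cons p rest ih =>
    obtain ⟨n, d⟩ := p
    obtain ⟨hhead, htail⟩ := List.pairwise_cons.mp hr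
    rw [show flagsMergeScan ((n, d) :: rest) l =
        (if (match l.dropWhile (fun s => decide (s < n)) with
              | [] => false | x :: _ => x == n) == d
         then flagsMergeScan rest (l.dropWhile (fun s => decide (s < n))) else false) from rfl]
    rw [head_dropWhile_eq_mem l n hl]
    have hl' : (l.dropWhile (fun s => decide (s < n))).Pairwise (· < ·) :=
      hl.sublist (List.dropWhile_sublist _)
    have hrest : ∀ q ∈ rest, ((q.1 ∈ l.dropWhile (fun s => decide (s < n))) ↔ q.1 ∈ l) :=
      fun q hq => mem_dropWhile_lt_iff l n q.1 (hhead q hq)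
    by_cases hd : decide (n ∈ l) = d
    · rw [hd]
      simp only [beq_self_eq_true, if_true]
      rw [ih _ hl' htail]
      constructor
      · intro h q hq
        rcases List.mem_cons.mp hq with h' | h'
        · rw [h']; exact hd
        · rw [← h q h']
          exact (decide_eq_decide.mpr (hrest q h')).symm
      · intro h q hq
        rw [decide_eq_decide.mpr (hrest q hq)]
        exact h q (List.mem_cons_of_mem _ hq)
    · have hb : (decide (n ∈ l) == d) = false := by
        cases d <;> cases hnl : decide (n ∈ l) <;> simp_all
      rw [hb]
      simp only [Bool.false_eq_true, if_false, false_iff]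
      intro hall
      exact hd (hall (n, d) List.mem_cons_self)

theorem flags_apply_spec : Claim_equal_flags_apply := by
  intro sys_flags opt_flags _
  unfold Spec_flags_apply flags_apply flags_apply_alt
  rw [flags_apply_fold_eq]
  -- the sorted available list
  have havail_sorted : (PySem.List.sorted (PySem.Set.ofList sys_flags) (fun x => x)).Pairwise (· < ·) :=
    PySem.List.sorted_ofList_pairwise_lt sys_flags
  -- the sorted requirement list
  have hreqs_sorted := PySem.List.sorted_pairwise
    (opt_flags.map (fun f =>
      if PySem.Str.startswith f "!" then (PySem.Str.slice f (some 1) none, false)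
      else (f, true)))
    (fun p : String × Bool => p.1)
  rw [Bool.eq_iff_iff]
  rw [flagsMergeScan_iff _ _ havail_sorted hreqs_sorted]
  simp only [Bool.and_eq_true, PySem.Set.isdisjoint_iff, PySem.Set.issubset_iff,
    PySem.Set.mem_ofList, List.nil_append, PySem.List.mem_sorted, List.mem_map,
    List.mem_filter]
  constructor
  · rintro ⟨hno, hyes⟩ p hp
    rcases hp with ⟨f, hf, hpf⟩
    by_cases h : PySem.Str.startswith f "!" = true
    · rw [if_pos h] at hpf
      rw [← hpf]
      simp only [decide_eq_false_iff_not]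
      exact hno _ ⟨f, ⟨hf, h⟩, rfl⟩
    · rw [if_neg h] at hpf
      rw [← hpf]
      simp only [decide_eq_true_eq]
      exact hyes f ⟨hf, by simp [Bool.not_eq_true] at h ⊢; exact h⟩
  · intro hall
    constructor
    · rintro x ⟨f, ⟨hf, h⟩, rfl⟩
      have := hall (PySem.Str.slice f (some 1) none, false)
        ⟨f, hf, by rw [if_pos h]⟩
      simp only [decide_eq_false_iff_not] at this
      exact this
    · rintro f ⟨hf, h⟩
      simp only [Bool.not_eq_true'] at h
      have := hall (f, true) ⟨f, hf, by rw [if_neg (by simpa using h)]⟩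
      simp only [decide_eq_true_eq] at this
      exact this
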